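-- pv_equiv track=rewrite | github.com/PedroDRodrigues/FP | FP_2021_Projeto_1.py | eh_posicao_livre
-- ===== SOURCE A (Python) =====
-- def eh_tabuleiro(tab):
--    if not (isinstance(tab, tuple) and len(tab) == 3):
--       return False
--    for l in tab:
--       if not eh_linha(l):
--          return False
--    return True
--
-- def eh_linha(l):
--     if not (isinstance(l, tuple) and len(l) == 3):
--         return False
--     for n in l:
--         if not eh_elemento(n):
--             return False
--     return True
--
-- def eh_elemento(n):
--     if (isinstance(n, int) and (n>= -1) and (n<= 1)):
--         return True
--     else:
--         return False
--
-- def eh_posicao_livre(tab, p):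
--     if not (eh_tabuleiro(tab) and isinstance(p,int) and (p>=1) and (p<=9)):
--         raise ValueError('eh_posicao_livre: algum dos argumentos e invalido')
--     else:
--         con = ()
--         for l in tab:
--             for c in l:
--                 con = con + (c, )
--         if con[p-1] == 0:
--             return True
--         else:
--             return False
-- ===== SOURCE B (Python) =====
-- def eh_tabuleiro(tab):
--    if not (isinstance(tab, tuple) and len(tab) == 3):
--       return False
--    for l in tab:
--       if not eh_linha(l):
--          return False
--    return True
--
-- def eh_linha(l):
--     if not (isinstance(l, tuple) and len(l) == 3):
--         return False
--     for n in l: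
--         if not eh_elemento(n):
--             return False
--     return True
--
-- def eh_elemento(n):
--     if (isinstance(n, int) and (n >= -1) and (n <= 1)):
--         return True
--     else:
--         return False
--
-- def eh_posicao_livre(tab, p):
--     if not (eh_tabuleiro(tab) and isinstance(p, int) and (p >= 1) and (p <= 9)):
--         raise ValueError('eh_posicao_livre: algum dos argumentos e invalido')
--     return tab[(p - 1) // 3][(p - 1) % 3] == 0
-- ===== Notes on version B (the rewrite author's own statement) =====
-- stated objective: simpler
-- what changed: Replaces the loop that flattens the board into a tuple `con` followed by `con[p-1]` with a direct closed-form 2D index tab[(p-1)//3][(p-1)%3], so no intermediate tuple is built and no loop runs in the main branch.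
-- outside the precondition, e.g. on eh_posicao_livre(((0, 0, 0), (0, 0, 0), (0, 0, 0)), 0): A raises ValueError, B raises ValueError
import Mathlib
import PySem

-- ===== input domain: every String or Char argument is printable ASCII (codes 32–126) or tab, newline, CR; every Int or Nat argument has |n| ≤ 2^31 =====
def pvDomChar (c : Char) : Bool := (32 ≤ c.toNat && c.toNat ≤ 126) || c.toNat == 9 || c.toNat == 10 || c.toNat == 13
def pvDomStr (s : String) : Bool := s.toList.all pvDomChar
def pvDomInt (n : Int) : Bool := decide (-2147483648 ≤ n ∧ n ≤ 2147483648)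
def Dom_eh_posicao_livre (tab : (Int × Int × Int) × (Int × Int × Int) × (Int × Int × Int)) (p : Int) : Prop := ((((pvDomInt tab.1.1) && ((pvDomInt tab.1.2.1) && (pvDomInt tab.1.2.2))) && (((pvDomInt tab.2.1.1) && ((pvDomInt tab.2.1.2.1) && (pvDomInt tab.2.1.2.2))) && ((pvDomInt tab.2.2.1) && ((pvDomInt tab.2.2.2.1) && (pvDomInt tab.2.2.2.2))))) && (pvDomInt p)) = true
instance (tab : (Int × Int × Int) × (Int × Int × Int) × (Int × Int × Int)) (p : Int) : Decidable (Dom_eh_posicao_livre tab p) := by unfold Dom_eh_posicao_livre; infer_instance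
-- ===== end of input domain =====

-- B replaces A's flattening loop + con[p-1] with a direct closed-form 2D index (p-1)//3, (p-1)%3 (simpler).


-- ===== PORT A =====
-- eh_elemento / eh_linha / eh_tabuleiro: the validation predicates (tuple shape is carried by the Lean type)
def pvEhElemento (n : Int) : Bool := if -1 ≤ n ∧ n ≤ 1 then true else false
def pvEhLinha (l : Int × Int × Int) : Bool :=
  [l.1, l.2.1, l.2.2].all (fun n => pvEhElemento n)
def pvEhTabuleiro (tab : (Int × Int × Int) × (Int × Int × Int) × (Int × Int × Int)) : Bool :=
  [tab.1, tab.2.1, tab.2.2].all (fun l => pvEhLinha l)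

def eh_posicao_livre (tab : (Int × Int × Int) × (Int × Int × Int) × (Int × Int × Int)) (p : Int) : Bool :=
  if ¬ (pvEhTabuleiro tab = true ∧ 1 ≤ p ∧ p ≤ 9) then
    false  -- Python raises ValueError here; excluded by Pre_
  else
    -- con = (); for l in tab: for c in l: con = con + (c,)
    let con : List Int :=
      [tab.1, tab.2.1, tab.2.2].foldl
        (fun acc l => [l.1, l.2.1, l.2.2].foldl (fun a c => a ++ [c]) acc) []
    match PySem.List.pyGet? con (p - 1) with
    | some v => if v = 0 then true else false
    | none => false

-- ===== PORT B =====
def eh_posicao_livre_alt (tab : (Int × Int × Int) × (Int × Int × Int) × (Int × Int × Int)) (p : Int) : Bool :=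
  if ¬ (pvEhTabuleiro tab = true ∧ 1 ≤ p ∧ p ≤ 9) then
    false  -- Python raises ValueError here; excluded by Pre_
  else
    let row := PySem.Int.floordiv (p - 1) 3
    let col := PySem.Int.mod (p - 1) 3
    let r := if row = 0 then tab.1 else if row = 1 then tab.2.1 else tab.2.2
    let c := if col = 0 then r.1 else if col = 1 then r.2.1 else r.2.2
    c == 0

-- ===== PRECONDITION & SPEC =====
-- Pre_: exactly the inputs on which A returns (otherwise it raises ValueError):
-- every board entry in {-1,0,1} and 1 ≤ p ≤ 9.
def Pre_eh_posicao_livre (tab : (Int × Int × Int) × (Int × Int × Int) × (Int × Int × Int)) (p : Int) : Prop :=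
  pvEhTabuleiro tab = true ∧ 1 ≤ p ∧ p ≤ 9
instance (tab : (Int × Int × Int) × (Int × Int × Int) × (Int × Int × Int)) (p : Int) : Decidable (Pre_eh_posicao_livre tab p) := by unfold Pre_eh_posicao_livre; infer_instance

def pvWitness_eh_posicao_livre : ((Int × Int × Int) × (Int × Int × Int) × (Int × Int × Int)) × Int :=
  (((0, 1, -1), (1, 0, 0), (-1, 0, 1)), 5)

def Spec_eh_posicao_livre (tab : (Int × Int × Int) × (Int × Int × Int) × (Int × Int × Int)) (p : Int) (out : Bool) : Prop := out = eh_posicao_livre_alt tab p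
instance (tab : (Int × Int × Int) × (Int × Int × Int) × (Int × Int × Int)) (p : Int) (out : Bool) : Decidable (Spec_eh_posicao_livre tab p out) := by unfold Spec_eh_posicao_livre; infer_instance

-- ===== CLAIM (what is proved, stated in full; the proofs are below) =====
def Claim_equal_eh_posicao_livre : Prop := ∀ (tab : (Int × Int × Int) × (Int × Int × Int) × (Int × Int × Int)) (p : Int), Dom_eh_posicao_livre tab p → Pre_eh_posicao_livre tab p → Spec_eh_posicao_livre tab p (eh_posicao_livre tab p)

-- ===== LEMMAS AND PROOFS =====

-- ===== VERDICT (by name: the statement is the Claim_ definition above) =====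
theorem eh_posicao_livre_spec : Claim_equal_eh_posicao_livre := by
  intro tab p _ hpre
  obtain ⟨⟨a1, a2, a3⟩, ⟨b1, b2, b3⟩, ⟨c1, c2, c3⟩⟩ := tab
  obtain ⟨htab, hp1, hp9⟩ := hpre
  unfold Spec_eh_posicao_livre eh_posicao_livre eh_posicao_livre_alt
  interval_cases p <;>
    simp_all [PySem.List.pyGet?, PySem.List.pyIdx?, PySem.Int.floordiv, PySem.Int.mod] <;>
    exact (Bool.beq_eq_decide_eq _ 0).symm
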